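-- pv_equiv track=rewrite | github.com/PDFAutofillerbackend/chatbot-new | live_fill_final.py | resolve_field_mapping
-- ===== SOURCE A (Python) =====
-- def resolve_field_mapping(mandatory_data: dict, form_keys_flat: dict):
--     """
--     Resolve mandatory field mappings to actual form_keys paths.
--     mandatory.json structure: "Human Name": "field_id" or nested
--     form_keys.json structure: "Section.field_id.value": ""
--
--     This function finds the actual paths in form_keys for each mandatory field.
--     """
--     resolved = {}
--
--     def find_field_path(field_id: str):
--         """Find the path in form_keys that contains this field ID"""
--         if not field_id:
--             return None
--         for path in form_keys_flat.keys():
--             # Check if field_id is in the path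
--             if field_id in path and path.endswith('.value'):
--                 return path
--         return None
--
--     def process_dict(d, parent_key=""):
--         """Recursively process mandatory structure"""
--         for key, value in d.items():
--             if isinstance(value, dict):
--                 # Nested structure, go deeper
--                 process_dict(value, key)
--             elif isinstance(value, str) and value:
--                 # String value = field ID mapping
--                 actual_path = find_field_path(value)
--                 if actual_path:
--                     resolved[actual_path] = ""
--             elif value == "":
--                 # Empty string, check if it's a section header
--                 # Look for fields under this section
--                 if parent_key:
--                     section_prefix = f"{parent_key}.{key}"
--                 else:
--                     section_prefix = key
--
--                 # Find any field that starts with this section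
--                 for path in form_keys_flat.keys():
--                     if section_prefix in path or key.replace(" ", "").lower() in path.lower():
--                         resolved[path] = ""
--
--     process_dict(mandatory_data)
--     return resolved
-- ===== SOURCE B (Python) =====
-- def resolve_field_mapping(mandatory_data: dict, form_keys_flat: dict):
--     """Collect, per mandatory item, the list of matching form_keys paths, then
--     build the result in one shot with dict.fromkeys (ordered dedup)."""
--     paths = list(form_keys_flat)
--     lowered = [p.lower() for p in paths]
--
--     def matches(key, value):
--         if value:
--             # field-id mapping: first '.value' path containing the id (or nothing)
--             return [p for p in paths if value in p and p.endswith('.value')][:1]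
--         norm = key.replace(" ", "").lower()
--         return [p for p, lp in zip(paths, lowered) if key in p or norm in lp]
--
--     hits = [p for key, value in mandatory_data.items() for p in matches(key, value)]
--     return dict.fromkeys(hits, "")
-- ===== Notes on version B (the rewrite author's own statement) =====
-- stated objective: alternative
-- what changed: A's recursive process_dict that mutates a shared resolved dict branch-by-branch is replaced by a flat pipeline: a pure helper computes each mandatory item's list of matching paths (with form-key lowercasing hoisted out of the scan), the lists are flattened into one hit sequence, and the result dict is built in a single dict.fromkeys(hits, "") ordered-dedup step.
import Mathlib
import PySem

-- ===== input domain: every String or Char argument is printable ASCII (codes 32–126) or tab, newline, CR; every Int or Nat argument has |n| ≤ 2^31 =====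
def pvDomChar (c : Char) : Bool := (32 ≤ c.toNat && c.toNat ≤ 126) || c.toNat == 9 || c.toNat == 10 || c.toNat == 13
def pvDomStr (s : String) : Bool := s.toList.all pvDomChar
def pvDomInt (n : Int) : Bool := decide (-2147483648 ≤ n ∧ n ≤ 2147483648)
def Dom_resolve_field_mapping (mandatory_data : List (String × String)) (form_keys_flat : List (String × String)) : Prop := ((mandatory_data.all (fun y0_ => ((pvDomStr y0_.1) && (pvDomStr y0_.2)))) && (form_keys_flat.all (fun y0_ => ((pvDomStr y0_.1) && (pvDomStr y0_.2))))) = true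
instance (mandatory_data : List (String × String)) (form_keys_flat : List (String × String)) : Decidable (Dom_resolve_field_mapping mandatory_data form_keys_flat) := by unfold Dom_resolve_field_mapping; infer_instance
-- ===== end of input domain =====

-- B replaces A's mutate-as-you-go recursion by a flat collect-then-dedup pipeline
-- (per-item match lists flattened, result built once with dict.fromkeys); objective: alternative.
-- Under the type convention mandatory_data is a flat dict of strings, so A's nested-dict
-- branch (isinstance(value, dict)) is unreachable and process_dict runs once with parent_key = "".

-- ===== PORT A =====
-- find_field_path: first path that contains field_id and ends with '.value'
def rfm_findFieldPath (form_keys : List String) (field_id : String) : Option String :=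
  if field_id = "" then none
  else form_keys.find? (fun path =>
    PySem.Str.isIn field_id path && PySem.Str.endswith path ".value")

-- process_dict's loop body over d.items(), mutating 'resolved'
def rfm_processDict (form_keys : List String) (d : List (String × String))
    (parent_key : String) (resolved : PySem.Dict String String) : PySem.Dict String String :=
  d.foldl (fun resolved kv =>
    let key := kv.1
    let value := kv.2
    -- Python's 'isinstance(value, dict)' branch is unreachable: values are strings here
    if value ≠ "" then
      match rfm_findFieldPath form_keys value with
      | some actual_path => resolved.insert actual_path ""
      | none => resolved
    else
      let section_prefix := if parent_key ≠ "" then parent_key ++ "." ++ key else key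
      form_keys.foldl (fun resolved path =>
        if PySem.Str.isIn section_prefix path
            || PySem.Str.isIn (PySem.Str.lower (PySem.Str.replace key " " "")) (PySem.Str.lower path)
        then resolved.insert path "" else resolved) resolved) resolved

def resolve_field_mapping (mandatory_data : List (String × String)) (form_keys_flat : List (String × String)) : List (String × String) :=
  (rfm_processDict (PySem.Dict.ofList form_keys_flat).keys
    (PySem.Dict.ofList mandatory_data).items "" PySem.Dict.empty).items

-- ===== PORT B =====
-- matches: the list of form paths one mandatory item resolves to
def rfm_matches (paths : List String) (lowered : List String) (key : String) (value : String) : List String :=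
  if value ≠ "" then
    (paths.filter (fun p =>
      PySem.Str.isIn value p && PySem.Str.endswith p ".value")).take 1
  else
    ((paths.zip lowered).filter (fun pl =>
      PySem.Str.isIn key pl.1
        || PySem.Str.isIn (PySem.Str.lower (PySem.Str.replace key " " "")) pl.2)).map (·.1)

def resolve_field_mapping_alt (mandatory_data : List (String × String)) (form_keys_flat : List (String × String)) : List (String × String) :=
  let paths := (PySem.Dict.ofList form_keys_flat).keys
  let lowered := paths.map PySem.Str.lower
  let hits := (PySem.Dict.ofList mandatory_data).items.flatMap
    (fun kv => rfm_matches paths lowered kv.1 kv.2)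
  (PySem.List.dedup hits).map (fun p => (p, ""))

-- ===== PRECONDITION & SPEC =====
def Spec_resolve_field_mapping (mandatory_data : List (String × String)) (form_keys_flat : List (String × String)) (out : List (String × String)) : Prop := out = resolve_field_mapping_alt mandatory_data form_keys_flat
instance (mandatory_data : List (String × String)) (form_keys_flat : List (String × String)) (out : List (String × String)) : Decidable (Spec_resolve_field_mapping mandatory_data form_keys_flat out) := by unfold Spec_resolve_field_mapping; infer_instance

-- ===== CLAIM (what is proved, stated in full; the proofs are below) =====
def Claim_equal_resolve_field_mapping : Prop := ∀ (mandatory_data : List (String × String)) (form_keys_flat : List (String × String)), Dom_resolve_field_mapping mandatory_data form_keys_flat → Spec_resolve_field_mapping mandatory_data form_keys_flat (resolve_field_mapping mandatory_data form_keys_flat)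

-- ===== LEMMAS AND PROOFS =====

-- zip a list with its own image and filter/project = filter the list directly
lemma rfm_zip_map_filter {α : Type} (f : α → α) (c : α × α → Bool) :
    ∀ (l : List α),
      (((l.zip (l.map f)).filter c).map (·.1)) = l.filter (fun x => c (x, f x)) := by
  intro l
  induction l with
  | nil => rfl
  | cons x xs ih =>
    simp only [List.map_cons, List.zip_cons_cons, List.filter_cons]
    by_cases h : c (x, f x) = true
    · simp [h, ih]
    · simp [h, ih]

-- one A-step equals folding plain inserts over B's match list (parent_key = "")
lemma rfm_step_eq (paths : List String) (kv : String × String)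
    (d : PySem.Dict String String) :
    (if kv.2 ≠ "" then
      match rfm_findFieldPath paths kv.2 with
      | some actual_path => d.insert actual_path ""
      | none => d
    else
      let section_prefix := if ("" : String) ≠ "" then "" ++ "." ++ kv.1 else kv.1
      paths.foldl (fun resolved path =>
        if PySem.Str.isIn section_prefix path
            || PySem.Str.isIn (PySem.Str.lower (PySem.Str.replace kv.1 " " "")) (PySem.Str.lower path)
        then resolved.insert path "" else resolved) d)
      = (rfm_matches paths (paths.map PySem.Str.lower) kv.1 kv.2).foldl
          (fun d p => d.insert p "") d := by
  have h0 : ¬(("" : String) ≠ "") := fun h => h rfl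
  by_cases hv : kv.2 = ""
  · -- empty value: section scan = fold over the filtered paths
    simp only [hv, rfm_matches, if_neg h0]
    rw [rfm_zip_map_filter]
    simp only [List.foldl_filter]
  · -- non-empty value: first '.value' match
    simp only [rfm_matches, if_pos hv, rfm_findFieldPath, if_neg hv]
    rw [← List.head?_filter]
    cases h : (paths.filter (fun p =>
        PySem.Str.isIn kv.2 p && PySem.Str.endswith p ".value")) with
    | nil => simp
    | cons p t => simp [List.take]

-- the whole A loop is a fold of plain inserts over the flattened hit list
lemma rfm_loop_eq (paths : List String) :
    ∀ (items : List (String × String)) (d : PySem.Dict String String),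
      rfm_processDict paths items "" d
        = (items.flatMap (fun kv => rfm_matches paths (paths.map PySem.Str.lower) kv.1 kv.2)).foldl
            (fun d p => d.insert p "") d := by
  intro items
  induction items with
  | nil => intro d; rfl
  | cons kv rest ih =>
    intro d
    simp only [rfm_processDict, List.foldl_cons, List.flatMap_cons, List.foldl_append]
    rw [← rfm_step_eq paths kv d]
    exact ih _

-- every default-"" lookup in the insert-"" fold yields ""
lemma rfm_getD_fold (hs : List String) :
    ∀ (d : PySem.Dict String String),
      (∀ k, d.getD k "" = "") →
      ∀ k, (hs.foldl (fun d p => d.insert p "") d).getD k "" = "" := by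
  induction hs with
  | nil => intro d hd k; exact hd k
  | cons x xs ih =>
    intro d hd k
    simp only [List.foldl_cons]
    refine ih _ (fun k' => ?_) k
    rw [PySem.Dict.getD_insert]
    split
    · rfl
    · exact hd k'

-- the items of the insert-"" fold from the empty dict: ordered dedup, paired with ""
lemma rfm_fold_items (hs : List String) :
    ((hs.foldl (fun d p => d.insert p "") (PySem.Dict.empty : PySem.Dict String String)).items)
      = (PySem.List.dedup hs).map (fun p => (p, "")) := by
  have hkeys : (hs.foldl (fun d p => d.insert p "") (PySem.Dict.empty : PySem.Dict String String)).keys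
      = PySem.List.dedup hs := by
    have := PySem.Dict.keys_foldl_insert hs (fun _ _ => ("" : String)) PySem.Dict.empty
    simpa [PySem.List.dedup, PySem.Set.ofList, PySem.Set.update] using this
  have hnd : (hs.foldl (fun d p => d.insert p "") (PySem.Dict.empty : PySem.Dict String String)).keys.Nodup :=
    PySem.Dict.nodup_keys_foldl_insert hs (fun _ _ => ("" : String)) PySem.Dict.empty
      (by simp)
  have hget : ∀ k, (hs.foldl (fun d p => d.insert p "") (PySem.Dict.empty : PySem.Dict String String)).getD k "" = "" :=
    rfm_getD_fold hs PySem.Dict.empty (fun k => by simp [PySem.Dict.getD_empty])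
  rw [PySem.Dict.items_eq_map_keys _ hnd ""]
  rw [hkeys]
  exact List.map_congr_left (fun k _ => by rw [hget k])

-- ===== VERDICT (by name: the statement is the Claim_ definition above) =====
theorem resolve_field_mapping_spec : Claim_equal_resolve_field_mapping := by
  intro md fk _
  unfold Spec_resolve_field_mapping resolve_field_mapping resolve_field_mapping_alt
  rw [rfm_loop_eq, rfm_fold_items]
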